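-- pv_equiv track=rewrite | github.com/SQNing/Design_Mott_Materials | translation-invariant-spin-model-simplifier/scripts/simplify/compile_operator_bond_to_matrix.py | _kron
-- ===== SOURCE A (Python) =====
-- def _kron(left, right):
--     result = []
--     for left_row in left:
--         for right_row in right:
--             row = []
--             for left_value in left_row:
--                 row.extend(left_value * right_value for right_value in right_row)
--             result.append(row)
--     return result
-- ===== SOURCE B (Python) =====
-- def _kron(left, right):
--     out = []
--     for left_row in left:
--         # bank of len(right) partial output rows, grown one block-column at a time
--         rows = [[] for _ in right]
--         for lv in left_row:
--             for k, right_row in enumerate(right):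
--                 rows[k] += [lv * rv for rv in right_row]
--         out += rows
--     return out
-- ===== Notes on version B (the rewrite author's own statement) =====
-- stated objective: alternative
-- what changed: Instead of emitting each output row left-to-right with right_row outer and left_value inner, B transposes the traversal: per left row it maintains a bank of len(right) partial output rows and grows all of them one block-column at a time (left_value outer, right row inner), flushing the bank when the left row is exhausted.
import Mathlib
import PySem

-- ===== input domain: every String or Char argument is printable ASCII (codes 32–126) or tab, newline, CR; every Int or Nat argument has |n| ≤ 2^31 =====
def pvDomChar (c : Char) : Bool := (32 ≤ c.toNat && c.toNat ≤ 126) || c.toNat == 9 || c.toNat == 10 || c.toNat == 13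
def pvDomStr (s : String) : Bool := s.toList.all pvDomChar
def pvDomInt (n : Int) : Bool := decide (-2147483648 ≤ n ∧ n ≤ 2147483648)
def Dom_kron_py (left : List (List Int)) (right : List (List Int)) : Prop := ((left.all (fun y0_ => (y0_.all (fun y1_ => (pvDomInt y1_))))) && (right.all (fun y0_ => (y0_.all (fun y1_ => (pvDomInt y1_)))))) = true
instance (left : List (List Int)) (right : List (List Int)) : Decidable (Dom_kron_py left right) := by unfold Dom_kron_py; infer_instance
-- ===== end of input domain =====

-- B transposes A's traversal: per left row it keeps a bank of len(right) partial output rows and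
-- grows all of them one block-column at a time (left_value outer, right row inner); same cost.

-- ===== PORT A =====
-- literal transliteration of A's nested loops with append/extend accumulators
def kron_py (left : List (List Int)) (right : List (List Int)) : List (List Int) :=
  left.foldl (fun result left_row =>
    right.foldl (fun result right_row =>
      result ++ [left_row.foldl (fun row left_value =>
        row ++ right_row.map (fun right_value => left_value * right_value)) []]) result) []

-- ===== PORT B =====
-- literal transliteration of Source B: 'rows = [[] for _ in right]; for lv: for k, rr in enumerate(right): rows[k] += …'
-- (updating rows[k] for every k in order = mapping the extension over rows zipped with right)
def kron_py_alt (left : List (List Int)) (right : List (List Int)) : List (List Int) :=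
  left.foldl (fun out left_row =>
    out ++ left_row.foldl (fun rows lv =>
      (rows.zip right).map (fun p => p.1 ++ p.2.map (fun rv => lv * rv)))
      (right.map (fun _ => ([] : List Int)))) []

-- ===== PRECONDITION & SPEC =====
def Spec_kron_py (left : List (List Int)) (right : List (List Int)) (out : List (List Int)) : Prop := out = kron_py_alt left right
instance (left : List (List Int)) (right : List (List Int)) (out : List (List Int)) : Decidable (Spec_kron_py left right out) := by unfold Spec_kron_py; infer_instance

-- ===== CLAIM (what is proved, stated in full; the proofs are below) =====
def Claim_equal_kron_py : Prop := ∀ (left : List (List Int)) (right : List (List Int)), Dom_kron_py left right → Spec_kron_py left right (kron_py left right)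

-- ===== LEMMAS AND PROOFS =====

theorem pv_zip_map_self {α β : Type} (l : List α) (f : α → β) :
    (l.map f).zip l = l.map (fun x => (f x, x)) := by
  induction l with
  | nil => simp
  | cons a t ih => simp [ih]

-- the bank invariant: folding the left row over a bank shaped like right keeps it shaped like
-- right, each slot accumulating its own row independently
theorem pv_bank (right : List (List Int)) (lvs : List Int) (g : List Int → List Int) :
    lvs.foldl (fun rows lv =>
        (rows.zip right).map (fun p => p.1 ++ p.2.map (fun rv => lv * rv)))
        (right.map g)
      = right.map (fun rr => lvs.foldl (fun row lv => row ++ rr.map (fun rv => lv * rv)) (g rr)) := by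
  induction lvs generalizing g with
  | nil => simp
  | cons lv t ih =>
    simp only [List.foldl_cons]
    rw [pv_zip_map_self, List.map_map]
    exact ih (fun rr => g rr ++ rr.map (fun rv => lv * rv))

-- ===== VERDICT (by name: the statement is the Claim_ definition above) =====
theorem kron_py_spec : Claim_equal_kron_py := by
  intro left right _
  show kron_py left right = kron_py_alt left right
  unfold kron_py kron_py_alt
  simp only [PySem.List.foldl_append_singleton_eq_map, PySem.List.foldl_append_eq_flatMap,
    List.nil_append, pv_bank]
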